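-- pv_equiv track=rewrite | github.com/maptoan/MTrans | tests/legacy_root_scripts/test_metadata_v2.py | _merge_glossary_entries
-- ===== SOURCE A (Python) =====
-- from typing import Dict, List
--
-- def _merge_glossary_entries(entries: List[Dict]) -> List[Dict]:
--     """Gộp các entry glossary, loại bỏ trùng lặp theo Term key phù hợp."""
--     seen = {}
--     for entry in entries:
--         # [FIX] Support multiple key variants (Standard vs Prompt v2.0 vs Legacy)
--         key = (entry.get('Original_Term_CN') or
--                entry.get('Original_Term_Chinese') or
--                entry.get('Original_Term_Pinyin') or
--                entry.get('Term') or
--                entry.get('Original Term') or '')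
--
--         # Normalize keys to Standard Internal Format for consistency
--         if 'Original_Term_Chinese' in entry:
--             entry['Original_Term_CN'] = entry.pop('Original_Term_Chinese')
--         if 'Translation_Method' in entry:
--             entry['Translation_Rule'] = entry.pop('Translation_Method')
--         if 'Usage_Context' in entry:
--             entry['Context_Usage'] = entry.pop('Usage_Context')
--         if 'Frequency_Level' in entry:
--             entry['Frequency'] = entry.pop('Frequency_Level')
--         if 'Translation_Notes' in entry:
--             entry['Notes'] = entry.pop('Translation_Notes')
--
--         if key and key not in seen:
--             # IMPORTANT: Create a copy to avoid reference issues in real usage, though here simple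
--             seen[key] = entry
--         elif key and key in seen:
--             # Merge: ưu tiên frequency cao hơn hoặc thông tin chi tiết hơn
--             old_len = len(str(seen[key].get('Notes', '')))
--             new_len = len(str(entry.get('Notes', '')))
--             if new_len > old_len:
--                 seen[key] = entry
--
--     return list(seen.values())
-- ===== SOURCE B (Python) =====
-- from typing import Dict, List
--
-- _KEY_FIELDS = ['Original_Term_CN', 'Original_Term_Chinese',
--                'Original_Term_Pinyin', 'Term', 'Original Term']
--
-- _RENAMES = [('Original_Term_Chinese', 'Original_Term_CN'),
--             ('Translation_Method', 'Translation_Rule'),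
--             ('Usage_Context', 'Context_Usage'),
--             ('Frequency_Level', 'Frequency'),
--             ('Translation_Notes', 'Notes')]
--
--
-- def _notes_len(entry):
--     return len(str(entry.get('Notes', '')))
--
--
-- def _merge_glossary_entries(entries: List[Dict]) -> List[Dict]:
--     """Merge glossary entries, dropping duplicates by the matching term key."""
--     # Pass 1: capture the dedupe key before renaming, then normalize via a table.
--     tagged = []
--     for entry in entries:
--         key = ''
--         for field in _KEY_FIELDS:
--             value = entry.get(field)
--             if value:
--                 key = value
--                 break
--         for old, new in _RENAMES:
--             if old in entry:
--                 entry[new] = entry.pop(old)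
--         tagged.append((key, entry))
--
--     # Pass 2: group entries by key, first-occurrence order, skipping empty keys.
--     groups = {}
--     for key, entry in tagged:
--         if key:
--             groups[key] = groups.get(key, []) + [entry]
--
--     # Pass 3: per group keep the first entry with the longest Notes value.
--     result = []
--     for group in groups.values():
--         best = group[0]
--         for entry in group[1:]:
--             if _notes_len(entry) > _notes_len(best):
--                 best = entry
--         result.append(best)
--     return result
-- ===== Notes on version B (the rewrite author's own statement) =====
-- stated objective: alternative
-- what changed: One streaming loop with a keep-or-replace dict becomes three passes: tag each entry with its pre-normalization key (field list + rename table instead of inline chains), group tagged entries by key into lists, then select per group the first entry of maximal Notes length.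
import Mathlib
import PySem

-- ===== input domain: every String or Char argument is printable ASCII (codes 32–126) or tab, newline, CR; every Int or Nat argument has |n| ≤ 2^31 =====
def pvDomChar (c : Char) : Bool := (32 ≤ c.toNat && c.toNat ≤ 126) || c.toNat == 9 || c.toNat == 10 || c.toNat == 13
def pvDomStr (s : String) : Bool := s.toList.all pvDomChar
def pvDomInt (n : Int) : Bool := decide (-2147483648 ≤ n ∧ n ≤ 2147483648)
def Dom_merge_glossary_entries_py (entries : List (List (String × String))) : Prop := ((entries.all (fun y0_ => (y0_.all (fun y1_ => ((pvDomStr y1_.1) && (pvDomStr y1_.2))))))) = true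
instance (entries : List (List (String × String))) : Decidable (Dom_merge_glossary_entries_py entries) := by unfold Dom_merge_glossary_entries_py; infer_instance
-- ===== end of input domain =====

-- B merges the same glossary entries by key in three passes (tag, group, select) instead of A's
-- single streaming keep-or-replace loop; return values are identical (both also rename keys of the
-- input dicts in place in the Python, a side effect this file does not model).

-- ===== PORT A =====

-- Python 'x or y' for x an optional string ('' and None are falsy)
def pvOr (o : Option String) (y : String) : String :=
  match o with
  | some s => if s ≠ "" then s else y
  | none => y

-- one loop iteration of A: compute key, normalize the five legacy field names, keep-or-replace in seen
def pvAStep (seen : PySem.Dict String (PySem.Dict String String))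
    (entryL : List (String × String)) : PySem.Dict String (PySem.Dict String String) :=
  let entry0 := PySem.Dict.mk entryL
  let key := pvOr (entry0.get? "Original_Term_CN")
              (pvOr (entry0.get? "Original_Term_Chinese")
                (pvOr (entry0.get? "Original_Term_Pinyin")
                  (pvOr (entry0.get? "Term")
                    (pvOr (entry0.get? "Original Term") ""))))
  let e1 := if entry0.contains "Original_Term_Chinese" then
      match entry0.pop? "Original_Term_Chinese" with
      | some (v, e) => e.insert "Original_Term_CN" v
      | none => entry0
    else entry0
  let e2 := if e1.contains "Translation_Method" then
      match e1.pop? "Translation_Method" with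
      | some (v, e) => e.insert "Translation_Rule" v
      | none => e1
    else e1
  let e3 := if e2.contains "Usage_Context" then
      match e2.pop? "Usage_Context" with
      | some (v, e) => e.insert "Context_Usage" v
      | none => e2
    else e2
  let e4 := if e3.contains "Frequency_Level" then
      match e3.pop? "Frequency_Level" with
      | some (v, e) => e.insert "Frequency" v
      | none => e3
    else e3
  let e5 := if e4.contains "Translation_Notes" then
      match e4.pop? "Translation_Notes" with
      | some (v, e) => e.insert "Notes" v
      | none => e4
    else e4
  if key ≠ "" && !(seen.contains key) then
    seen.insert key e5
  else if key ≠ "" && seen.contains key then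
    -- seen[key]: the key is present in this branch, so getD's default is never read
    let old_len := PySem.Str.len ((seen.getD key PySem.Dict.empty).getD "Notes" "")
    let new_len := PySem.Str.len (e5.getD "Notes" "")
    if new_len > old_len then seen.insert key e5 else seen
  else seen

def merge_glossary_entries_py (entries : List (List (String × String))) : List (List (String × String)) :=
  ((entries.foldl pvAStep PySem.Dict.empty).values).map PySem.Dict.items

-- ===== PORT B =====

def pvKeyFields : List String :=
  ["Original_Term_CN", "Original_Term_Chinese", "Original_Term_Pinyin", "Term", "Original Term"]

def pvRenames : List (String × String) :=
  [("Original_Term_Chinese", "Original_Term_CN"), ("Translation_Method", "Translation_Rule"),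
   ("Usage_Context", "Context_Usage"), ("Frequency_Level", "Frequency"),
   ("Translation_Notes", "Notes")]

-- Source B's key loop: first truthy entry.get(field), '' when none is
def pvFirstTruthy : List String → PySem.Dict String String → String
  | [], _ => ""
  | f :: fs, e =>
    match e.get? f with
    | some v => if v ≠ "" then v else pvFirstTruthy fs e
    | none => pvFirstTruthy fs e

-- Source B's "if old in entry: entry[new] = entry.pop(old)"
def pvRename1 (e : PySem.Dict String String) (p : String × String) : PySem.Dict String String :=
  if e.contains p.1 then
    match e.pop? p.1 with
    | some (v, e') => e'.insert p.2 v
    | none => e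
  else e

-- pass 1 body: (key before renaming, normalized entry)
def pvTag (entryL : List (String × String)) : String × PySem.Dict String String :=
  let entry := PySem.Dict.mk entryL
  (pvFirstTruthy pvKeyFields entry, pvRenames.foldl pvRename1 entry)

def pvNotesLen (e : PySem.Dict String String) : Int := PySem.Str.len (e.getD "Notes" "")

-- pass 2 body
def pvGroupStep (g : PySem.Dict String (List (PySem.Dict String String)))
    (t : String × PySem.Dict String String) : PySem.Dict String (List (PySem.Dict String String)) :=
  if t.1 ≠ "" then g.insert t.1 (g.getD t.1 [] ++ [t.2]) else g

-- pass 3 body: first entry of the group with the longest Notes ([] is unreachable: groups are nonempty)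
def pvBest (group : List (PySem.Dict String String)) : PySem.Dict String String :=
  match group with
  | [] => PySem.Dict.empty
  | h :: t => t.foldl (fun best e => if pvNotesLen e > pvNotesLen best then e else best) h

def merge_glossary_entries_py_alt (entries : List (List (String × String))) : List (List (String × String)) :=
  let tagged := entries.map pvTag
  let groups := tagged.foldl pvGroupStep PySem.Dict.empty
  (groups.values).map (fun group => (pvBest group).items)

-- ===== PRECONDITION & SPEC =====
def Spec_merge_glossary_entries_py (entries : List (List (String × String))) (out : List (List (String × String))) : Prop := out = merge_glossary_entries_py_alt entries
instance (entries : List (List (String × String))) (out : List (List (String × String))) : Decidable (Spec_merge_glossary_entries_py entries out) := by unfold Spec_merge_glossary_entries_py; infer_instance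

-- ===== CLAIM (what is proved, stated in full; the proofs are below) =====
def Claim_equal_merge_glossary_entries_py : Prop := ∀ (entries : List (List (String × String))), Dom_merge_glossary_entries_py entries → Spec_merge_glossary_entries_py entries (merge_glossary_entries_py entries)

-- ===== LEMMAS AND PROOFS =====

-- A's decision part, reformulated on a (key, entry) tag; pvAStep = pvTagStep ∘ pvTag (lemma pvAStep_eq)
def pvTagStep (seen : PySem.Dict String (PySem.Dict String String))
    (t : String × PySem.Dict String String) : PySem.Dict String (PySem.Dict String String) :=
  if t.1 ≠ "" && !(seen.contains t.1) then
    seen.insert t.1 t.2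
  else if t.1 ≠ "" && seen.contains t.1 then
    if PySem.Str.len (t.2.getD "Notes" "") > PySem.Str.len ((seen.getD t.1 PySem.Dict.empty).getD "Notes" "") then
      seen.insert t.1 t.2
    else seen
  else seen

lemma pvAStep_eq (seen : PySem.Dict String (PySem.Dict String String)) (entryL : List (String × String)) :
    pvAStep seen entryL = pvTagStep seen (pvTag entryL) := by
  rfl

-- map pvBest over the values of the groups dict
def pvMapVals (d : PySem.Dict String (List (PySem.Dict String String))) :
    PySem.Dict String (PySem.Dict String String) :=
  PySem.Dict.mk (d.items.map (fun p => (p.1, pvBest p.2)))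

lemma contains_pvMapVals (d : PySem.Dict String (List (PySem.Dict String String))) (k : String) :
    (pvMapVals d).contains k = d.contains k := by
  simp [pvMapVals, PySem.Dict.contains, List.any_map, Function.comp_def]

lemma get?_mk_map_pvBest (l : List (String × List (PySem.Dict String String))) (k : String) :
    (PySem.Dict.mk (l.map (fun p => (p.1, pvBest p.2)))).get? k
      = ((PySem.Dict.mk l).get? k).map pvBest := by
  induction l with
  | nil => rfl
  | cons q rest ih =>
    rw [List.map_cons, PySem.Dict.get?_mk_cons, PySem.Dict.get?_mk_cons]
    cases hq : (q.1 == k) with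
    | true => simp
    | false => simpa using ih

lemma get?_pvMapVals (d : PySem.Dict String (List (PySem.Dict String String))) (k : String) :
    (pvMapVals d).get? k = (d.get? k).map pvBest := by
  obtain ⟨l⟩ := d
  exact get?_mk_map_pvBest l k

lemma pvMapVals_insert (d : PySem.Dict String (List (PySem.Dict String String))) (k : String)
    (v : List (PySem.Dict String String)) :
    pvMapVals (d.insert k v) = (pvMapVals d).insert k (pvBest v) := by
  by_cases hc : d.contains k = true
  · have hc' : (pvMapVals d).contains k = true := by rw [contains_pvMapVals]; exact hc
    apply PySem.Dict.ext
    show (d.insert k v).items.map (fun p => (p.1, pvBest p.2)) = _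
    rw [PySem.Dict.items_insert_of_contains d v hc,
        PySem.Dict.items_insert_of_contains (pvMapVals d) (pvBest v) hc']
    show _ = (d.items.map (fun p => (p.1, pvBest p.2))).map _
    rw [List.map_map, List.map_map]
    apply List.map_congr_left
    intro p _
    by_cases h : (p.1 == k) = true <;> simp [h, Function.comp]
  · have hc0 : d.contains k = false := by simpa using hc
    have hc' : (pvMapVals d).contains k = false := by rw [contains_pvMapVals]; exact hc0
    apply PySem.Dict.ext
    show (d.insert k v).items.map (fun p => (p.1, pvBest p.2)) = _
    rw [PySem.Dict.items_insert_of_not_contains _ _ hc',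
        PySem.Dict.items_insert_of_not_contains d v hc0]
    simp [pvMapVals]

lemma pv_insert_get?_self {ν : Type} (d : PySem.Dict String ν) (k : String) (v : ν)
    (h : d.get? k = some v) (hnd : d.keys.Nodup) : d.insert k v = d := by
  have hc : d.contains k = true := by
    rw [PySem.Dict.contains_eq_isSome_get?, h]; rfl
  apply PySem.Dict.ext
  rw [PySem.Dict.items_insert_of_contains d v hc]
  obtain ⟨l⟩ := d
  simp only [PySem.Dict.keys] at hnd
  show l.map (fun p => if (p.1 == k) = true then (k, v) else p) = l
  induction l with
  | nil => rfl
  | cons q rest ih =>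
    rw [PySem.Dict.get?_mk_cons] at h
    cases hq : (q.1 == k) with
    | true =>
      rw [hq] at h
      have hk : q.1 = k := eq_of_beq hq
      have hv : q.2 = v := by simpa using h
      have hrest : ∀ p ∈ rest, ((p.1 == k) = false) := by
        intro p hp
        apply beq_eq_false_iff_ne.mpr
        intro hEq
        have h1 : q.1 ∉ rest.map Prod.fst := by
          simp only [List.map_cons, List.nodup_cons] at hnd
          exact hnd.1
        exact h1 (by rw [hk, ← hEq]; exact List.mem_map_of_mem hp)
      rw [List.map_cons, hq]
      have h2 : rest.map (fun p => if (p.1 == k) = true then (k, v) else p) = rest := by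
        have h3 : ∀ p ∈ rest, (if (p.1 == k) = true then (k, v) else p) = p := by
          intro p hp; simp [hrest p hp]
        rw [List.map_congr_left h3]; simp
      rw [h2, ← hk, ← hv]; simp
    | false =>
      rw [hq] at h
      simp only [Bool.false_eq_true, if_false] at h
      have hnd' : (rest.map Prod.fst).Nodup := by
        simp only [List.map_cons, List.nodup_cons] at hnd
        exact hnd.2
      have hc' : (PySem.Dict.mk rest).contains k = true := by
        rw [PySem.Dict.contains_eq_isSome_get?, h]; rfl
      rw [List.map_cons, hq]
      simp only [Bool.false_eq_true, if_false]
      rw [ih h hnd' hc']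

lemma pvBest_append (h : PySem.Dict String String) (t : List (PySem.Dict String String))
    (e : PySem.Dict String String) :
    pvBest ((h :: t) ++ [e]) = if pvNotesLen e > pvNotesLen (pvBest (h :: t)) then e else pvBest (h :: t) := by
  simp [pvBest, List.foldl_append]

-- main invariant: folding A's decision over tags keeps seen = pvMapVals groups
lemma keys_pvMapVals (d : PySem.Dict String (List (PySem.Dict String String))) :
    (pvMapVals d).keys = d.keys := by
  simp [pvMapVals, PySem.Dict.keys, List.map_map, Function.comp_def]

lemma pv_main (ts : List (String × PySem.Dict String String)) :
    ∀ (g : PySem.Dict String (List (PySem.Dict String String))),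
      g.keys.Nodup → (∀ p ∈ g.items, p.2 ≠ []) →
      ts.foldl pvTagStep (pvMapVals g) = pvMapVals (ts.foldl pvGroupStep g) := by
  induction ts with
  | nil => intro g _ _; rfl
  | cons t ts ih =>
    intro g hnd hne
    rw [List.foldl_cons, List.foldl_cons]
    by_cases hk : t.1 = ""
    · have hstep : pvTagStep (pvMapVals g) t = pvMapVals g := by simp [pvTagStep, hk]
      have hgstep : pvGroupStep g t = g := by simp [pvGroupStep, hk]
      rw [hstep, hgstep]
      exact ih g hnd hne
    · by_cases hc : g.contains t.1 = true
      · -- the key already has a group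
        obtain ⟨gr, hget⟩ : ∃ gr, g.get? t.1 = some gr := by
          rw [PySem.Dict.contains_eq_isSome_get?] at hc
          exact Option.isSome_iff_exists.mp hc
        have hgr_ne : gr ≠ [] := hne (t.1, gr) (PySem.Dict.mem_items_of_get?_eq_some g hget)
        obtain ⟨h0, tl, rfl⟩ : ∃ h0 tl, gr = h0 :: tl := by
          cases gr with
          | nil => exact absurd rfl hgr_ne
          | cons a b => exact ⟨a, b, rfl⟩
        have hgetD : g.getD t.1 [] = h0 :: tl := by
          rw [PySem.Dict.getD_eq_get?_getD, hget]; rfl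
        have hcM : (pvMapVals g).contains t.1 = true := by
          rw [contains_pvMapVals]; exact hc
        have hgetM? : (pvMapVals g).get? t.1 = some (pvBest (h0 :: tl)) := by
          rw [get?_pvMapVals, hget]; rfl
        have hgetM : (pvMapVals g).getD t.1 PySem.Dict.empty = pvBest (h0 :: tl) := by
          rw [PySem.Dict.getD_eq_get?_getD, hgetM?]; rfl
        have hgstep : pvGroupStep g t = g.insert t.1 ((h0 :: tl) ++ [t.2]) := by
          simp [pvGroupStep, hk, hgetD]
        have hstep : pvTagStep (pvMapVals g) t = pvMapVals (g.insert t.1 ((h0 :: tl) ++ [t.2])) := by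
          rw [pvMapVals_insert, pvBest_append]
          by_cases hlen : pvNotesLen t.2 > pvNotesLen (pvBest (h0 :: tl))
          · have hlen' : PySem.Str.len (t.2.getD "Notes" "")
                > PySem.Str.len (((pvMapVals g).getD t.1 PySem.Dict.empty).getD "Notes" "") := by
              rw [hgetM]; exact hlen
            simp [pvTagStep, hk, hcM, hlen]
            intro hle
            exfalso
            have h' := hlen'
            simp [PySem.Str.len] at h'
            omega
          · have hlen' : ¬ (PySem.Str.len (t.2.getD "Notes" "")
                > PySem.Str.len (((pvMapVals g).getD t.1 PySem.Dict.empty).getD "Notes" "")) := by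
              rw [hgetM]; exact hlen
            simp only [pvTagStep, hcM]
            simp [hlen, pv_insert_get?_self (pvMapVals g) t.1 (pvBest (h0 :: tl)) hgetM?
              (by rw [keys_pvMapVals]; exact hnd)]
            intro _ hlt
            exfalso
            have h' := hlen'
            simp [PySem.Str.len] at h'
            omega
        rw [hstep, hgstep]
        apply ih
        · exact PySem.Dict.nodup_keys_insert g t.1 _ hnd
        · intro p hp
          rcases (PySem.Dict.mem_items_insert g t.1 _ p).mp hp with h | ⟨h, _⟩
          · rw [h]; simp
          · exact hne p h
      · -- fresh key
        have hc0 : g.contains t.1 = false := by simpa using hc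
        have hget : g.get? t.1 = none := by
          rw [PySem.Dict.contains_eq_isSome_get?] at hc0
          exact Option.not_isSome_iff_eq_none.mp (by simp [hc0])
        have hgetD : g.getD t.1 [] = [] := by
          rw [PySem.Dict.getD_eq_get?_getD, hget]; rfl
        have hcM : (pvMapVals g).contains t.1 = false := by
          rw [contains_pvMapVals]; exact hc0
        have hgstep : pvGroupStep g t = g.insert t.1 [t.2] := by
          simp [pvGroupStep, hk, hgetD]
        have hstep : pvTagStep (pvMapVals g) t = pvMapVals (g.insert t.1 [t.2]) := by
          rw [pvMapVals_insert]
          simp [pvTagStep, hk, hcM, pvBest]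
        rw [hstep, hgstep]
        apply ih
        · exact PySem.Dict.nodup_keys_insert g t.1 _ hnd
        · intro p hp
          rcases (PySem.Dict.mem_items_insert g t.1 _ p).mp hp with h | ⟨h, _⟩
          · rw [h]; simp
          · exact hne p h

lemma values_pvMapVals (d : PySem.Dict String (List (PySem.Dict String String))) :
    (pvMapVals d).values = d.values.map pvBest := by
  simp [pvMapVals, PySem.Dict.values, List.map_map, Function.comp]

-- ===== VERDICT (by name: the statement is the Claim_ definition above) =====
theorem merge_glossary_entries_py_spec : Claim_equal_merge_glossary_entries_py := by
  intro entries _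
  unfold Spec_merge_glossary_entries_py merge_glossary_entries_py merge_glossary_entries_py_alt
  have h1 : entries.foldl pvAStep PySem.Dict.empty
      = (entries.map pvTag).foldl pvTagStep (pvMapVals PySem.Dict.empty) := by
    rw [List.foldl_map]
    have h : pvAStep = fun seen e => pvTagStep seen (pvTag e) := by
      funext s e; exact pvAStep_eq s e
    rw [h]
    rfl
  rw [h1, pv_main _ _ (by simp [PySem.Dict.keys, PySem.Dict.empty]) (by intro p hp; simp [PySem.Dict.empty] at hp),
    values_pvMapVals, List.map_map]
  rfl
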